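-- pv_equiv track=rewrite | github.com/sharhar/tm2d | tm2d/ctf/ctf.py | _odd_index_to_mn
-- ===== SOURCE A (Python) =====
-- def _odd_index_to_mn(i: int) -> tuple[int, int]:
--     # Z1^-1, Z1^1, Z3^-3, Z3^-1, Z3^1, ...
--     count = 0
--     n = 1
--     while True:
--         for m in range(-n, n + 1, 2):
--             if count == i:
--                 return m, n
--             count += 1
--         n += 2
-- ===== SOURCE B (Python) =====
-- def _isqrt(n: int) -> int:
--     # Newton's integer square root (no imports; math.isqrt not used since A imports nothing).
--     if n < 2:
--         return n
--     x = n
--     y = (x + n // x) // 2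
--     while y < x:
--         x = y
--         y = (x + n // x) // 2
--     return x
--
--
-- def _odd_index_to_mn(i: int) -> tuple[int, int]:
--     # level k has n = 2k+1 and holds indices k(k+1) .. k(k+1)+n; solve for k in closed form.
--     k = (_isqrt(4 * i + 1) - 1) // 2
--     n = 2 * k + 1
--     m = -n + 2 * (i - k * (k + 1))
--     return m, n
-- ===== Notes on version B (the rewrite author's own statement) =====
-- stated objective: faster
-- what changed: Replaces A's level-by-level enumeration of the (m,n) table with a closed form: n = 2k+1 where k is obtained from a Newton integer square root of 4i+1, and m from the offset i - k(k+1).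
import Mathlib
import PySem

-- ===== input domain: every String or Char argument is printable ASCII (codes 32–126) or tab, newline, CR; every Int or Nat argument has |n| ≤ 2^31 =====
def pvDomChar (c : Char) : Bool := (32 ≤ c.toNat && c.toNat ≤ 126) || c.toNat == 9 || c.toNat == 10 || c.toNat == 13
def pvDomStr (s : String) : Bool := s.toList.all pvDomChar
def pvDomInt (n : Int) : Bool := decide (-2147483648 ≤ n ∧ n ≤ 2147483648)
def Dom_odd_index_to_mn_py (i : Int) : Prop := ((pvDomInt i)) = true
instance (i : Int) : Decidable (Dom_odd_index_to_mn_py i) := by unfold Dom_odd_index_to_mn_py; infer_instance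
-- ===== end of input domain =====

-- B replaces A's level-by-level table walk with a closed form built on a Newton integer
-- square root of 4i+1 (objective: faster).

-- ===== PORT A =====
-- inner `for m in range(-n, n+1, 2)` with the early return; .inl = returned pair, .inr = updated count
def pvAFor (i n : Int) : List Int → Int → Sum (List Int) Int
  | [], count => .inr count
  | m :: ms, count => if count = i then .inl [m, n] else pvAFor i n ms (count + 1)

-- the `while True` outer loop; fuel only makes the recursion total (i.toNat+1 levels always
-- suffice, since each level advances count by at least 2)
def pvAOuter (i : Int) : Nat → Int → Int → List Int
  | 0, _, _ => []
  | fuel + 1, count, n =>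
    match pvAFor i n (PySem.List.pyRange (-n) (n + 1) 2) count with
    | .inl r => r
    | .inr c => pvAOuter i fuel c (n + 2)

def odd_index_to_mn_py (i : Int) : List Int := pvAOuter i (i.toNat + 1) 0 1

-- ===== PORT B =====
-- Newton integer square root, as in Source B; fuel only for totality (x strictly decreases each step)
def pvISqrtLoop (n : Int) : Nat → Int → Int → Int
  | 0, x, _ => x
  | fuel + 1, x, y =>
    if y < x then pvISqrtLoop n fuel y (PySem.Int.floordiv (y + PySem.Int.floordiv n y) 2)
    else x

def pvISqrt (n : Int) : Int :=
  if n < 2 then n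
  else pvISqrtLoop n n.toNat n (PySem.Int.floordiv (n + PySem.Int.floordiv n n) 2)

def odd_index_to_mn_py_alt (i : Int) : List Int :=
  let k := PySem.Int.floordiv (pvISqrt (4 * i + 1) - 1) 2
  let n := 2 * k + 1
  let m := -n + 2 * (i - k * (k + 1))
  [m, n]

-- ===== PRECONDITION & SPEC =====
-- A's `while True` never returns for i < 0 (count only grows from 0), so Pre_ excludes exactly those inputs.
def Pre_odd_index_to_mn_py (i : Int) : Prop := 0 ≤ i
instance (i : Int) : Decidable (Pre_odd_index_to_mn_py i) := by unfold Pre_odd_index_to_mn_py; infer_instance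
def pvWitness_odd_index_to_mn_py : Int := 5

def Spec_odd_index_to_mn_py (i : Int) (out : List Int) : Prop := out = odd_index_to_mn_py_alt i
instance (i : Int) (out : List Int) : Decidable (Spec_odd_index_to_mn_py i out) := by unfold Spec_odd_index_to_mn_py; infer_instance

-- ===== CLAIM (what is proved, stated in full; the proofs are below) =====
def Claim_equal_odd_index_to_mn_py : Prop := ∀ (i : Int), Dom_odd_index_to_mn_py i → Pre_odd_index_to_mn_py i → Spec_odd_index_to_mn_py i (odd_index_to_mn_py i)

-- ===== LEMMAS AND PROOFS =====

theorem pvFdivPos (a b : Int) (hb : 0 < b) : PySem.Int.floordiv a b = a / b := by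
  simp only [PySem.Int.floordiv]
  exact Int.fdiv_eq_ediv_of_nonneg a hb.le

-- square-root bracketing of Nat.sqrt, cast to Int
theorem pvSqrtFacts (n : Int) (hn : 0 ≤ n) :
    (Nat.sqrt n.toNat : Int) * (Nat.sqrt n.toNat : Int) ≤ n ∧
      n < ((Nat.sqrt n.toNat : Int) + 1) * ((Nat.sqrt n.toNat : Int) + 1) := by
  have h1 := Nat.sqrt_le' n.toNat
  have h2 := Nat.lt_succ_sqrt' n.toNat
  rw [pow_two] at h1 h2
  constructor
  · calc (Nat.sqrt n.toNat : Int) * (Nat.sqrt n.toNat : Int)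
        = ((Nat.sqrt n.toNat * Nat.sqrt n.toNat : Nat) : Int) := by push_cast; ring
      _ ≤ (n.toNat : Int) := by exact_mod_cast h1
      _ = n := Int.toNat_of_nonneg hn
  · calc n = (n.toNat : Int) := (Int.toNat_of_nonneg hn).symm
      _ < (((Nat.sqrt n.toNat).succ * (Nat.sqrt n.toNat).succ : Nat) : Int) := by exact_mod_cast h2
      _ = ((Nat.sqrt n.toNat : Int) + 1) * ((Nat.sqrt n.toNat : Int) + 1) := by push_cast; ring

theorem pvNewtonLower (n x : Int) (hn : 0 ≤ n) (hx : 0 < x) :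
    (Nat.sqrt n.toNat : Int) ≤ PySem.Int.floordiv (x + PySem.Int.floordiv n x) 2 := by
  obtain ⟨hlo, -⟩ := pvSqrtFacts n hn
  set s : Int := (Nat.sqrt n.toNat : Int) with hs
  rw [pvFdivPos _ _ hx, pvFdivPos _ _ (by norm_num : (0:Int) < 2)]
  rw [Int.le_ediv_iff_mul_le (by norm_num : (0:Int) < 2)]
  have h1 : 2 * s - x ≤ n / x := by
    rw [Int.le_ediv_iff_mul_le hx]
    nlinarith [sq_nonneg (s - x)]
  linarith

theorem pvNewtonExit (n x : Int) (hx : 0 < x)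
    (h : x ≤ PySem.Int.floordiv (x + PySem.Int.floordiv n x) 2) : x * x ≤ n := by
  rw [pvFdivPos _ _ (by norm_num : (0:Int) < 2), pvFdivPos _ _ hx] at h
  have h2 : x * 2 ≤ x + n / x := (Int.le_ediv_iff_mul_le (by norm_num : (0:Int) < 2)).1 h
  have h3 : x ≤ n / x := by linarith
  have h4 : x * x ≤ n := (Int.le_ediv_iff_mul_le hx).1 h3
  exact h4

theorem pvISqrtLoop_eq (n : Int) (hn : 2 ≤ n) : ∀ (fuel : Nat) (x : Int),
    (Nat.sqrt n.toNat : Int) ≤ x → (x - (Nat.sqrt n.toNat : Int)).toNat ≤ fuel →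
    pvISqrtLoop n fuel x (PySem.Int.floordiv (x + PySem.Int.floordiv n x) 2) =
      (Nat.sqrt n.toNat : Int) := by
  intro fuel
  induction fuel with
  | zero =>
    intro x hsx hf
    have hx : x = (Nat.sqrt n.toNat : Int) := by omega
    simp [pvISqrtLoop, hx]
  | succ fuel ih =>
    intro x hsx hf
    have hs1 : 1 ≤ Nat.sqrt n.toNat := Nat.le_sqrt.2 (by omega)
    have hx : 0 < x := by omega
    simp only [pvISqrtLoop]
    by_cases hlt : PySem.Int.floordiv (x + PySem.Int.floordiv n x) 2 < x
    · rw [if_pos hlt]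
      have hge := pvNewtonLower n x (by omega) hx
      exact ih _ hge (by omega)
    · rw [if_neg hlt]
      have hxx : x * x ≤ n := pvNewtonExit n x hx (Int.not_lt.mp hlt)
      have h1 : x.toNat * x.toNat ≤ n.toNat := by
        have h0 : ((x.toNat : Int)) * (x.toNat : Int) ≤ ((n.toNat : Int)) := by
          rw [Int.toNat_of_nonneg hx.le, Int.toNat_of_nonneg (by omega : (0:Int) ≤ n)]
          exact hxx
        exact_mod_cast h0
      have h2 : x.toNat ≤ Nat.sqrt n.toNat := Nat.le_sqrt.2 h1
      omega

theorem pvISqrt_eq (n : Int) (hn : 0 ≤ n) : pvISqrt n = (Nat.sqrt n.toNat : Int) := by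
  unfold pvISqrt
  by_cases h : n < 2
  · rw [if_pos h]
    have h01 : n = 0 ∨ n = 1 := by omega
    rcases h01 with rfl | rfl <;> norm_num
  · rw [if_neg h]
    apply pvISqrtLoop_eq n (Int.not_lt.mp h)
    · have := Nat.sqrt_le_self n.toNat
      omega
    · omega

-- the inner for-loop over an arithmetic progression, in one statement
theorem pvAFor_range (i n : Int) : ∀ (N : Nat) (a count : Int), count ≤ i →
    pvAFor i n ((List.range N).map (fun (k : Nat) => a + 2 * (k : Int))) count =
      if i < count + (N : Int) then .inl [a + 2 * (i - count), n] else .inr (count + (N : Int)) := by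
  intro N
  induction N with
  | zero =>
    intro a count hc
    simp only [List.range_zero, List.map_nil, pvAFor, Nat.cast_zero, add_zero]
    rw [if_neg (by omega)]
  | succ N ih =>
    intro a count hc
    rw [List.range_succ_eq_map]
    simp only [List.map_cons, List.map_map]
    by_cases h : count = i
    · subst h
      simp [pvAFor]
    · have hc1 : count + 1 ≤ i := by omega
      have hmap : (List.range N).map ((fun (k : Nat) => a + 2 * (k : Int)) ∘ Nat.succ) =
          (List.range N).map (fun (k : Nat) => (a + 2) + 2 * (k : Int)) := by
        apply List.map_congr_left; intro k _; simp [Function.comp]; push_cast; ring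
      simp only [pvAFor, if_neg h]
      rw [hmap, ih (a + 2) (count + 1) hc1]
      push_cast
      split_ifs with hA hB
      · simp only [Sum.inl.injEq, List.cons.injEq, and_true]
        ring
      · exfalso; omega
      · exfalso; omega
      · simp only [Sum.inr.injEq]; ring

theorem pvRange_step2 (n : Int) (hn : 1 ≤ n) :
    PySem.List.pyRange (-n) (n + 1) 2 =
      (List.range (n + 1).toNat).map (fun (k : Nat) => -n + 2 * (k : Int)) := by
  rw [PySem.List.pyRange_of_pos _ _ (by norm_num : (0:Int) < 2)]
  rw [if_pos (by omega : (-n : Int) < n + 1)]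
  have hq : ((n + 1 : Int) - (-n) + 2 - 1) / 2 = n + 1 := by omega
  rw [hq]

theorem pvAOuter_eq (i cf nf : Int) (hodd : nf % 2 = 1) (hsq : 4 * cf + 1 = nf * nf)
    (h2 : cf ≤ i) (h3 : i < cf + nf + 1) :
    ∀ (fuel : Nat) (count n : Int), 1 ≤ n → n % 2 = 1 → n ≤ nf → 4 * count + 1 = n * n →
    (i - count).toNat < 2 * fuel →
    pvAOuter i fuel count n = [-nf + 2 * (i - cf), nf] := by
  intro fuel
  induction fuel with
  | zero =>
    intro count n h1 hp hle hinv hfuel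
    exfalso
    have hcle : count ≤ cf := by nlinarith
    omega
  | succ fuel ih =>
    intro count n h1 hp hle hinv hfuel
    have hcle : count ≤ cf := by nlinarith
    have hN : (((n + 1).toNat : Nat) : Int) = n + 1 := by omega
    simp only [pvAOuter]
    rw [pvRange_step2 n h1, pvAFor_range i n _ _ _ (by omega), hN]
    by_cases hfound : i < count + (n + 1)
    · -- at the last level: n = nf, count = cf
      have hnn : n = nf := by
        by_contra hne
        have hlt : n + 2 ≤ nf := by omega
        have hinv2 : 4 * (count + n + 1) + 1 = (n + 2) * (n + 2) := by linear_combination hinv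
        have : count + n + 1 ≤ cf := by nlinarith
        omega
      have hcc : count = cf := by nlinarith
      rw [if_pos hfound]
      subst hnn hcc
      rfl
    · rw [if_neg hfound]
      have hne : n ≠ nf := by
        intro h; subst h
        have : count = cf := by nlinarith
        omega
      apply ih
      · omega
      · omega
      · omega
      · linear_combination hinv
      · omega

-- ===== VERDICT (by name: the statement is the Claim_ definition above) =====
theorem odd_index_to_mn_py_spec : Claim_equal_odd_index_to_mn_py := by
  intro i _ hpre
  have hi : (0:Int) ≤ i := hpre
  unfold Spec_odd_index_to_mn_py
  show odd_index_to_mn_py i = odd_index_to_mn_py_alt i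
  have h4 : (0:Int) ≤ 4 * i + 1 := by omega
  obtain ⟨hlo, hhi⟩ := pvSqrtFacts (4 * i + 1) h4
  simp only [odd_index_to_mn_py, odd_index_to_mn_py_alt, pvISqrt_eq _ h4]
  set s : Int := (Nat.sqrt (4 * i + 1).toNat : Int) with hs
  have hs1 : 1 ≤ s := by
    have h1 : 1 ≤ Nat.sqrt (4 * i + 1).toNat := Nat.le_sqrt.2 (by omega)
    omega
  rw [pvFdivPos _ _ (by norm_num : (0:Int) < 2)]
  set k : Int := (s - 1) / 2 with hk
  have hk2 : 2 * k ≤ s - 1 ∧ s - 1 < 2 * k + 2 := by omega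
  have hk0 : 0 ≤ k := by omega
  have hlow : (2 * k + 1) * (2 * k + 1) ≤ 4 * i + 1 := by nlinarith
  have hup : 4 * i + 1 < (2 * k + 3) * (2 * k + 3) := by nlinarith
  have hmain := pvAOuter_eq i (k * (k + 1)) (2 * k + 1) (by omega) (by ring)
    (by nlinarith) (by nlinarith) (i.toNat + 1) 0 1 (by norm_num) (by norm_num)
    (by omega) (by norm_num) (by omega)
  rw [hmain]
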